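-- pv_equiv track=rewrite | github.com/arsheed2000/EPR-05 | Game_Functions.py | gametable
-- ===== SOURCE A (Python) =====
-- def gametable(game_table, trump):  # Compare cards on table and return the biggest one
--     compare = []
--     for i in game_table:
--         if trump == i[1]:
--             compare.append(i)
--
--     if bool(compare):
--         return max(compare)
--     else:
--         return max(game_table)
-- ===== SOURCE B (Python) =====
-- def gametable(game_table, trump):  # Compare cards on table and return the biggest one
--     return max(game_table, key=lambda c: (c[1] == trump, c))
-- ===== Notes on version B (the rewrite author's own statement) =====
-- stated objective: idiomatic
-- what changed: Replaced the filter-list plus branch plus two max calls with a single keyed max over the whole table: the key (c[1] == trump, c) makes any trump card outrank every non-trump card and the card tuple breaks ties, so one pass gives the biggest trump if any, else the biggest card.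
import Mathlib
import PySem

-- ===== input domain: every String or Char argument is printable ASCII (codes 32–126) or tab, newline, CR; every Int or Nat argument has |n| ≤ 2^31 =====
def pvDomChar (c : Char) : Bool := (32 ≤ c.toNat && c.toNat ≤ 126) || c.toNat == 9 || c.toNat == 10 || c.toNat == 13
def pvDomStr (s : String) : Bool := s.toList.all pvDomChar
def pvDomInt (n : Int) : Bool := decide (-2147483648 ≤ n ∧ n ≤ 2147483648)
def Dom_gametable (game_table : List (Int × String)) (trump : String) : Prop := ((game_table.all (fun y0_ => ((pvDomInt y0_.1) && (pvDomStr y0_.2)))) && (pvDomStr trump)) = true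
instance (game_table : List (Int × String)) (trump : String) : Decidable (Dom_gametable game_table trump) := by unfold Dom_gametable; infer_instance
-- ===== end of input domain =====

-- B replaces A's filter-list + branch + two max calls with one keyed max pass (idiomatic);
-- both raise ValueError on an empty table, which Pre_ excludes.


-- ===== PORT A =====
-- Python's tuple comparison on (int, str): lexicographic (exact on pairs)
def pairLt (a b : Int × String) : Bool :=
  decide (a.1 < b.1) || (a.1 == b.1 && decide (a.2 < b.2))

-- hand port of Python's keyless max(xs) on pairs: running max keeping the FIRST maximal
-- (exact; [] would be a ValueError, excluded by Pre_)
def pymax (xs : List (Int × String)) : Int × String :=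
  match xs with
  | [] => (0, "")
  | x :: t => t.foldl (fun m c => if pairLt m c then c else m) x

def gametable (game_table : List (Int × String)) (trump : String) : Int × String :=
  let compare := game_table.foldl
    (fun acc i => if trump == i.2 then acc ++ [i] else acc) ([] : List (Int × String))
  if compare ≠ [] then pymax compare else pymax game_table

-- ===== PORT B =====
-- the key (c[1] == trump, c) compared as Python compares tuples: bool first, then the pair lexicographically (exact)
def keyLt (trump : String) (a b : Int × String) : Bool :=
  let ta := a.2 == trump
  let tb := b.2 == trump
  if ta == tb then decide (a.1 < b.1) || (a.1 == b.1 && decide (a.2 < b.2)) else (!ta && tb)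

-- hand port of max(xs, key=…): running max keeping the FIRST maximal under the key
-- (exact; [] would be a ValueError, excluded by Pre_)
def gametable_alt (game_table : List (Int × String)) (trump : String) : Int × String :=
  match game_table with
  | [] => (0, "")
  | x :: t => t.foldl (fun m c => if keyLt trump m c then c else m) x

-- ===== PRECONDITION & SPEC =====
-- Pre_ excludes only the empty table, on which A's max raises ValueError.
def Pre_gametable (game_table : List (Int × String)) (trump : String) : Prop := game_table ≠ []
instance (game_table : List (Int × String)) (trump : String) : Decidable (Pre_gametable game_table trump) := by unfold Pre_gametable; infer_instance
def pvWitness_gametable : (List (Int × String)) × String := ([(7, "H"), (9, "S")], "H")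

def Spec_gametable (game_table : List (Int × String)) (trump : String) (out : Int × String) : Prop := out = gametable_alt game_table trump
instance (game_table : List (Int × String)) (trump : String) (out : Int × String) : Decidable (Spec_gametable game_table trump out) := by unfold Spec_gametable; infer_instance

-- ===== CLAIM (what is proved, stated in full; the proofs are below) =====
def Claim_equal_gametable : Prop := ∀ (game_table : List (Int × String)) (trump : String), Dom_gametable game_table trump → Pre_gametable game_table trump → Spec_gametable game_table trump (gametable game_table trump)

-- ===== LEMMAS AND PROOFS =====

-- when both cards have the same trump status, the keyed comparison is the plain pair comparison
lemma keyLt_eq_pairLt (trump : String) (a b : Int × String)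
    (h : (a.2 == trump) = (b.2 == trump)) : keyLt trump a b = pairLt a b := by
  simp only [keyLt, pairLt, h, beq_self_eq_true, if_true]

lemma keyLt_tf (trump : String) (a b : Int × String)
    (h1 : (a.2 == trump) = true) (h2 : (b.2 == trump) = false) : keyLt trump a b = false := by
  simp [keyLt, h1, h2]

lemma keyLt_ft (trump : String) (a b : Int × String)
    (h1 : (a.2 == trump) = false) (h2 : (b.2 == trump) = true) : keyLt trump a b = true := by
  simp [keyLt, h1, h2]

-- the heart: B's single keyed pass equals "max of the trump cards if any, else max of all"
lemma key_fold_eq (trump : String) :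
    ∀ (t : List (Int × String)) (x : Int × String),
      t.foldl (fun m c => if keyLt trump m c then c else m) x =
        (if ((x :: t).filter (fun i => trump == i.2)) ≠ [] then
          pymax ((x :: t).filter (fun i => trump == i.2))
        else
          t.foldl (fun m c => if pairLt m c then c else m) x) := by
  intro t
  induction t with
  | nil =>
      intro x
      cases hx : (x.2 == trump)
      · have hx' : ¬ trump = x.2 := fun h => by simp [h] at hx
        simp [List.filter_cons, hx', pymax]
      · have hx' : trump = x.2 := by have := (beq_iff_eq.mp hx); exact this.symm
        simp [List.filter_cons, hx', pymax]
  | cons c t' ih =>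
      intro x
      cases hx : (x.2 == trump) <;> cases hc : (c.2 == trump)
      · -- neither trump: keyed step = plain step, filter unchanged
        have hx' : ¬ trump = x.2 := fun h => by simp [h] at hx
        have hc' : ¬ trump = c.2 := fun h => by simp [h] at hc
        have hk : keyLt trump x c = pairLt x c := keyLt_eq_pairLt trump x c (by rw [hx, hc])
        have h1 : (x :: t').filter (fun i => trump == i.2) = t'.filter (fun i => trump == i.2) := by
          simp [List.filter_cons, hx']
        have h2 : (c :: t').filter (fun i => trump == i.2) = t'.filter (fun i => trump == i.2) := by
          simp [List.filter_cons, hc']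
        have h3 : (x :: c :: t').filter (fun i => trump == i.2) = t'.filter (fun i => trump == i.2) := by
          simp [List.filter_cons, hx', hc']
        cases hp : pairLt x c
        · have hstep : (if keyLt trump x c = true then c else x) = x := by simp [hk, hp]
          simp only [List.foldl_cons, hstep, ih x]
          rw [h1, h3]
          simp [hp]
        · have hstep : (if keyLt trump x c = true then c else x) = c := by simp [hk, hp]
          simp only [List.foldl_cons, hstep, ih c]
          rw [h2, h3]
          simp [hp]
      · -- c trump, x not: keyed step takes c
        have hx' : ¬ trump = x.2 := fun h => by simp [h] at hx
        have hc' : trump = c.2 := ((beq_iff_eq.mp hc)).symm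
        have hstep : (if keyLt trump x c = true then c else x) = c := by
          simp [keyLt_ft trump x c hx hc]
        have hcx : ¬ c.2 = x.2 := fun h => hx' (hc'.trans h)
        simp only [List.foldl_cons, hstep, ih c]
        simp [List.filter_cons, hx', hc', hcx]
      · -- x trump, c not: keyed step keeps x, c vanishes from the filter
        have hx' : trump = x.2 := ((beq_iff_eq.mp hx)).symm
        have hc' : ¬ trump = c.2 := fun h => by simp [h] at hc
        have hstep : (if keyLt trump x c = true then c else x) = x := by
          simp [keyLt_tf trump x c hx hc]
        have hxc : ¬ x.2 = c.2 := by rw [← hx']; exact hc'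
        simp only [List.foldl_cons, hstep, ih x]
        simp [List.filter_cons, hx', hc', hxc]
      · -- both trump: keyed step = plain step, the filtered head is the stepped head
        have hx' : trump = x.2 := ((beq_iff_eq.mp hx)).symm
        have hc' : trump = c.2 := ((beq_iff_eq.mp hc)).symm
        have hk : keyLt trump x c = pairLt x c := keyLt_eq_pairLt trump x c (by rw [hx, hc])
        have hxc : x.2 = c.2 := by rw [← hx']; exact hc'
        cases hp : pairLt x c
        · have hstep : (if keyLt trump x c = true then c else x) = x := by simp [hk, hp]
          simp only [List.foldl_cons, hstep, ih x]
          simp [List.filter_cons, List.foldl_cons, hx', hc', hxc, pymax, hp]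
        · have hstep : (if keyLt trump x c = true then c else x) = c := by simp [hk, hp]
          simp only [List.foldl_cons, hstep, ih c]
          simp [List.filter_cons, List.foldl_cons, hx', hc', hxc, pymax, hp]

-- A, with its accumulator loop replaced by the filter it builds
lemma gametable_eq_filter_form (game_table : List (Int × String)) (trump : String) :
    gametable game_table trump =
      (if (game_table.filter (fun i => trump == i.2)) ≠ [] then
        pymax (game_table.filter (fun i => trump == i.2))
      else
        pymax game_table) := by
  show (if (game_table.foldl (fun acc i => if trump == i.2 then acc ++ [i] else acc)
              ([] : List (Int × String))) ≠ [] then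
          pymax (game_table.foldl (fun acc i => if trump == i.2 then acc ++ [i] else acc)
              ([] : List (Int × String)))
        else pymax game_table) = _
  rw [PySem.List.foldl_append_if_eq_filter, List.nil_append]

-- ===== VERDICT (by name: the statement is the Claim_ definition above) =====
theorem gametable_spec : Claim_equal_gametable := by
  intro game_table trump _ hpre
  unfold Spec_gametable
  match game_table with
  | [] => exact absurd rfl hpre
  | x :: t =>
      rw [gametable_eq_filter_form]
      show _ = t.foldl (fun m c => if keyLt trump m c then c else m) x
      rw [key_fold_eq trump t x]
      rfl
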